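-- pv_equiv track=rewrite | github.com/light156/MultiphoQML | function/Clements.py | clements_mode_list
-- ===== SOURCE A (Python) =====
-- def clements_mode_list(mode_num):
--
--     mode_list = []
--
--     for k in range(mode_num):
--         if k%2==0:
--             for i in range(1, mode_num, 2):
--                 mode_list.append((i, i+1))
--         else:
--             for i in range(2, mode_num, 2):
--                 mode_list.append((i, i+1))
--
--     return mode_list
-- ===== SOURCE B (Python) =====
-- def clements_mode_list(mode_num):
--     odd_pairs = [(i, i + 1) for i in range(1, mode_num, 2)]
--     even_pairs = [(i, i + 1) for i in range(2, mode_num, 2)]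
--     return (odd_pairs + even_pairs) * (mode_num // 2) + (odd_pairs if mode_num % 2 else [])
-- ===== Notes on version B (the rewrite author's own statement) =====
-- stated objective: simpler
-- what changed: Replaced the outer loop over all mode_num layers (each rebuilding its pair block from a range with a parity branch) by precomputing the two fixed blocks once and assembling the result by list repetition plus an odd tail.
import Mathlib
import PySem

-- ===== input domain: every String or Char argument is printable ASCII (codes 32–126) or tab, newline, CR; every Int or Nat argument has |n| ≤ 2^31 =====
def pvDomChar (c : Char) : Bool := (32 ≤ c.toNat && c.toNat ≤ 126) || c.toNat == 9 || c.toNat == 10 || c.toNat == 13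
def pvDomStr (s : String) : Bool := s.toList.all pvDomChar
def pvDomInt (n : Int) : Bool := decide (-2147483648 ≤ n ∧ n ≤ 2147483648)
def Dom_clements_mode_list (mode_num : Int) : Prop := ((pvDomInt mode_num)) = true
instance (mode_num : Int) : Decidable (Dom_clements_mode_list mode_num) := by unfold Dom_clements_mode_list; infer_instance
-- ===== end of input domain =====

-- B builds the two fixed pair blocks once and assembles the list by repetition,
-- instead of A's outer loop over every layer with a parity branch (objective: simpler).

-- ===== PORT A =====
def clements_mode_list (mode_num : Int) : List (Int × Int) :=
  (PySem.List.pyRange 0 mode_num).foldl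
    (fun acc k =>
      if PySem.Int.mod k 2 == 0 then
        acc ++ (PySem.List.pyRange 1 mode_num 2).map (fun i => (i, i + 1))
      else
        acc ++ (PySem.List.pyRange 2 mode_num 2).map (fun i => (i, i + 1)))
    []

-- ===== PORT B =====
def clements_mode_list_alt (mode_num : Int) : List (Int × Int) :=
  let odd_pairs := (PySem.List.pyRange 1 mode_num 2).map (fun i => (i, i + 1))
  let even_pairs := (PySem.List.pyRange 2 mode_num 2).map (fun i => (i, i + 1))
  (List.replicate (PySem.Int.floordiv mode_num 2).toNat (odd_pairs ++ even_pairs)).flatten ++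
    (if PySem.Int.mod mode_num 2 ≠ 0 then odd_pairs else [])

-- ===== PRECONDITION & SPEC =====
def Spec_clements_mode_list (mode_num : Int) (out : List (Int × Int)) : Prop := out = clements_mode_list_alt mode_num
instance (mode_num : Int) (out : List (Int × Int)) : Decidable (Spec_clements_mode_list mode_num out) := by unfold Spec_clements_mode_list; infer_instance

-- ===== CLAIM (what is proved, stated in full; the proofs are below) =====
def Claim_equal_clements_mode_list : Prop := ∀ (mode_num : Int), Dom_clements_mode_list mode_num → Spec_clements_mode_list mode_num (clements_mode_list mode_num)

-- ===== LEMMAS AND PROOFS =====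

-- the alternating foldl over [0, …, m-1] is (odd++even) repeated m/2 times, plus an odd tail when m is odd
lemma alt_fold_layers (odd even : List (Int × Int)) :
    ∀ (m : Nat) (acc : List (Int × Int)),
      (List.range m).foldl
          (fun (acc : List (Int × Int)) (k : Nat) =>
            if PySem.Int.mod (k : Int) 2 == 0 then acc ++ odd else acc ++ even) acc
        = acc ++ (List.replicate (m / 2) (odd ++ even)).flatten ++
            (if m % 2 ≠ 0 then odd else []) := by
  intro m
  induction m with
  | zero => intro acc; simp
  | succ m ih =>
    intro acc
    rw [List.range_succ, List.foldl_append, ih]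
    simp only [List.foldl_cons, List.foldl_nil]
    have hmod : PySem.Int.mod (m : Int) 2 = ((m % 2 : Nat) : Int) := by
      exact_mod_cast PySem.Int.mod_natCast m 2
    rcases Nat.even_or_odd m with he | ho
    · have h0 : m % 2 = 0 := Nat.even_iff.mp he
      have hc : (PySem.Int.mod (m : Int) 2 == 0) = true := by rw [hmod, h0]; decide
      have h1 : (m + 1) % 2 = 1 := by omega
      have h2 : (m + 1) / 2 = m / 2 := by omega
      rw [hc]
      simp [h0, h1, h2]
    · have h0 : m % 2 = 1 := Nat.odd_iff.mp ho
      have hc : (PySem.Int.mod (m : Int) 2 == 0) = false := by rw [hmod, h0]; decide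
      have h1 : (m + 1) % 2 = 0 := by omega
      have h2 : (m + 1) / 2 = m / 2 + 1 := by omega
      rw [hc]
      simp [h0, h1, h2, List.replicate_succ', List.append_assoc]

-- ===== VERDICT (by name: the statement is the Claim_ definition above) =====
theorem clements_mode_list_spec : Claim_equal_clements_mode_list := by
  intro n _
  unfold Spec_clements_mode_list clements_mode_list clements_mode_list_alt
  by_cases hn : 0 ≤ n
  · obtain ⟨m, rfl⟩ : ∃ m : Nat, n = (m : Int) := ⟨n.toNat, (Int.toNat_of_nonneg hn).symm⟩
    rw [PySem.List.pyRange_zero_natCast, List.foldl_map, alt_fold_layers]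
    have hdiv : PySem.Int.floordiv (m : Int) 2 = ((m / 2 : Nat) : Int) := by
      exact_mod_cast PySem.Int.floordiv_natCast m 2
    have hmod : PySem.Int.mod (m : Int) 2 = ((m % 2 : Nat) : Int) := by
      exact_mod_cast PySem.Int.mod_natCast m 2
    rw [hdiv, hmod]
    have e1 : ((m / 2 : Nat) : Int).toNat = m / 2 := by omega
    rw [e1]
    by_cases hp : m % 2 = 0
    · simp [hp]
    · have hq : m % 2 = 1 := by omega
      simp [hq]
  · have h0 : PySem.List.pyRange 0 n 1 = [] := by
      rw [PySem.List.pyRange_of_pos 0 n (by omega : (0:Int) < 1)]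
      simp [show ¬ (0 < n) by omega]
    have h1 : PySem.List.pyRange 1 n 2 = [] := by
      rw [PySem.List.pyRange_of_pos 1 n (by omega : (0:Int) < 2)]
      simp [show ¬ (1 < n) by omega]
    have h2 : PySem.List.pyRange 2 n 2 = [] := by
      rw [PySem.List.pyRange_of_pos 2 n (by omega : (0:Int) < 2)]
      simp [show ¬ (2 < n) by omega]
    simp [h0, h1, h2]
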